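-- pv_equiv track=rewrite | github.com/lesleslie/crackerjack | crackerjack/agents/helpers/performance/performance_recommender.py | _apply_list_comprehension_optimizations
-- ===== SOURCE A (Python) =====
-- import operator
-- import typing as t
--
-- def _apply_list_comprehension_optimizations(
--     lines: list[str],
--     issue: dict[str, t.Any],
-- ) -> tuple[list[str], bool]:
--     """Apply list comprehension optimizations.
--
--     Args:
--         lines: File lines
--         issue: Issue dict
--
--     Returns:
--         Tuple of modified lines and bool
--     """
--     modified = False
--
--     instances = issue.get("instances", [])
--     for instance in sorted(
--         instances, key=operator.itemgetter("line_number"), reverse=True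
--     ):
--         line_idx = instance["line_number"] - 1
--         if line_idx < len(lines):
--             original_line = lines[line_idx]
--             indent = original_line[
--                 : len(original_line) - len(original_line.lstrip())
--             ]
--
--             comment = (
--                 f"{indent}# Performance: Consider list[t.Any] comprehension for "
--                 f"20-30% improvement"
--             )
--             lines.insert(line_idx, comment)
--             modified = True
--
--     return lines, modified
-- ===== SOURCE B (Python) =====
-- def _apply_list_comprehension_optimizations(lines, issue):
--     instances = issue.get("instances", [])
--     targets = [instance["line_number"] - 1 for instance in instances]
--     counts = {}
--     for idx in targets:
--         if 0 <= idx < len(lines):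
--             counts[idx] = counts.get(idx, 0) + 1
--     if not counts:
--         return lines, False
--     new_lines = []
--     for i, line in enumerate(lines):
--         c = counts.get(i, 0)
--         if c:
--             indent = line[: len(line) - len(line.lstrip())]
--             comment = (
--                 f"{indent}# Performance: Consider list[t.Any] comprehension for "
--                 f"20-30% improvement"
--             )
--             new_lines.extend([comment] * c)
--         new_lines.append(line)
--     lines[:] = new_lines
--     return lines, True
-- ===== Notes on version B (the rewrite author's own statement) =====
-- stated objective: alternative
-- what changed: Replaces the reverse-sort plus repeated list.insert loop (each insert shifting the tail) by one pass that counts valid targets into a dict and one forward pass that rebuilds the line list with the comments emitted in place; proves A's dynamic length test equals the test against the original length, so no sort is needed.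
import Mathlib
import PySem

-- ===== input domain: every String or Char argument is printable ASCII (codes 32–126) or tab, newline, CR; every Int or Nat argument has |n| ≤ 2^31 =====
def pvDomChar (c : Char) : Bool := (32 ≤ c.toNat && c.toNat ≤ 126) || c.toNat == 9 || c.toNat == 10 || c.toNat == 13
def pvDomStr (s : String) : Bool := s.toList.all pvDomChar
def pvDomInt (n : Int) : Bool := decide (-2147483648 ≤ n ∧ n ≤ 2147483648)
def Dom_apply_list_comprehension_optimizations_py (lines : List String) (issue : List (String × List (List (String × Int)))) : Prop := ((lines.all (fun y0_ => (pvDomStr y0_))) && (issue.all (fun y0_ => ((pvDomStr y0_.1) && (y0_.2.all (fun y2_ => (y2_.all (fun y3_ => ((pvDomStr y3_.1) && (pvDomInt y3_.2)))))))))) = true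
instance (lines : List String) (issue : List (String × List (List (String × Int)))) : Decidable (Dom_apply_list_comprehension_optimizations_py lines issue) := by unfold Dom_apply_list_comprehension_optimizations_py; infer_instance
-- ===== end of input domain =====

-- B replaces A's reverse-sort-and-repeated-insert loop (each insert shifts the list) by one counting
-- pass over the instances plus one forward pass that rebuilds the lines; return value proved equal on Pre_.
-- Both A and B mutate `lines` in place in Python (A via insert, B via lines[:] = …); the theorems are about the return value.

-- ===== PORT A =====
-- indent = line[: len(line) - len(line.lstrip())]; comment = f"{indent}# Performance: …"
-- (string slicing/concatenation done on the char list — exact; both Pythons contain this identical code)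
def pvComment (line : String) : String :=
  String.ofList (PySem.Chars.slice line.toList none
      (some ((PySem.Chars.len line.toList : Int) - (PySem.Chars.len (PySem.Chars.lstrip line.toList) : Int)))
    ++ "# Performance: Consider list[t.Any] comprehension for 20-30% improvement".toList)

-- instance["line_number"]; .getD 0 is only reached where Python raises KeyError (excluded by Pre_)
def pvLineNo (inst : List (String × Int)) : Int :=
  ((PySem.Dict.ofList inst).get? "line_number").getD 0

def apply_list_comprehension_optimizations_py (lines : List String) (issue : List (String × List (List (String × Int)))) : List String × Bool :=
  let instances := (PySem.Dict.ofList issue).getD "instances" []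
  (PySem.List.sorted instances pvLineNo true).foldl
    (fun st inst =>
      let idx : Int := pvLineNo inst - 1
      if idx < (st.1.length : Int) then
        -- lines[line_idx]; .getD "" is only reached where Python raises IndexError (excluded by Pre_)
        let original := (PySem.List.pyGet? st.1 idx).getD ""
        (PySem.List.insert st.1 idx (pvComment original), true)
      else st)
    (lines, false)

-- ===== PORT B =====
def apply_list_comprehension_optimizations_py_alt (lines : List String) (issue : List (String × List (List (String × Int)))) : List String × Bool :=
  let instances := (PySem.Dict.ofList issue).getD "instances" []
  let targets := instances.map (fun inst => pvLineNo inst - 1)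
  let counts := targets.foldl
    (fun d idx => if 0 ≤ idx ∧ idx < (lines.length : Int) then d.insert idx (d.getD idx 0 + 1) else d)
    (PySem.Dict.empty : PySem.Dict Int Int)
  if counts.items.isEmpty then (lines, false)
  else
    let newLines := (PySem.List.enumerate lines 0).foldl
      (fun acc p =>
        let c := counts.getD p.1 0
        if c ≠ 0 then acc ++ (List.replicate c.toNat (pvComment p.2) ++ [p.2])
        else acc ++ [p.2]) []
    (newLines, true)

-- ===== PRECONDITION & SPEC =====
-- Pre_ excludes instances whose "line_number" is missing (A raises KeyError inside sorted) or is ≤ 0,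
-- where A's `lines[line_idx]`/`insert` hit Python negative-index behaviour: A raises IndexError when the
-- negative index underflows and otherwise wraps around to count from the end — an accident of A's
-- implementation; B simply skips such instances.
def Pre_apply_list_comprehension_optimizations_py (lines : List String) (issue : List (String × List (List (String × Int)))) : Prop :=
  ∀ inst ∈ (PySem.Dict.ofList issue).getD "instances" [], 1 ≤ pvLineNo inst
instance (lines : List String) (issue : List (String × List (List (String × Int)))) : Decidable (Pre_apply_list_comprehension_optimizations_py lines issue) := by unfold Pre_apply_list_comprehension_optimizations_py; infer_instance

def pvWitness_apply_list_comprehension_optimizations_py : List String × (List (String × List (List (String × Int)))) :=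
  (["def f():", "    pass"], [("instances", [[("line_number", 2)], [("line_number", 1)]])])

def Spec_apply_list_comprehension_optimizations_py (lines : List String) (issue : List (String × List (List (String × Int)))) (out : List String × Bool) : Prop := out = apply_list_comprehension_optimizations_py_alt lines issue
instance (lines : List String) (issue : List (String × List (List (String × Int)))) (out : List String × Bool) : Decidable (Spec_apply_list_comprehension_optimizations_py lines issue out) := by unfold Spec_apply_list_comprehension_optimizations_py; infer_instance

-- ===== CLAIM (what is proved, stated in full; the proofs are below) =====
def Claim_equal_apply_list_comprehension_optimizations_py : Prop := ∀ (lines : List String) (issue : List (String × List (List (String × Int)))), Dom_apply_list_comprehension_optimizations_py lines issue → Pre_apply_list_comprehension_optimizations_py lines issue → Spec_apply_list_comprehension_optimizations_py lines issue (apply_list_comprehension_optimizations_py lines issue)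

-- ===== LEMMAS AND PROOFS =====
theorem pvIndent_spec (cs : List Char) :
    PySem.Chars.slice cs none
      (some ((PySem.Chars.len cs : Int) - (PySem.Chars.len (PySem.Chars.lstrip cs) : Int)))
      = cs.takeWhile PySem.Chars.isspace := by
  have hsplit := List.takeWhile_append_dropWhile (p := PySem.Chars.isspace) (l := cs)
  have hlen : cs.length = (cs.takeWhile PySem.Chars.isspace).length + (cs.dropWhile PySem.Chars.isspace).length := by
    have h := congrArg List.length hsplit
    rw [List.length_append] at h; omega
  have hd : PySem.Chars.lstrip cs = cs.dropWhile PySem.Chars.isspace := rfl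
  have h0 : (0:Int) ≤ (PySem.Chars.len cs : Int) - (PySem.Chars.len (PySem.Chars.lstrip cs) : Int) := by
    simp [PySem.Chars.len_eq, hd]; omega
  rw [PySem.Chars.slice_eq_listSlice, PySem.List.slice_to _ h0]
  have ht : ((PySem.Chars.len cs : Int) - (PySem.Chars.len (PySem.Chars.lstrip cs) : Int)).toNat
      = (cs.takeWhile PySem.Chars.isspace).length := by
    simp [PySem.Chars.len_eq, hd]; omega
  rw [ht, ← List.prefix_iff_eq_take.mp (List.takeWhile_prefix _)]

theorem pvComment_eq (l : String) :
    pvComment l = String.ofList (l.toList.takeWhile PySem.Chars.isspace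
      ++ "# Performance: Consider list[t.Any] comprehension for 20-30% improvement".toList) := by
  unfold pvComment
  congr 1
  simpa using pvIndent_spec l.toList

theorem pvComment_toList (l : String) :
    (pvComment l).toList = l.toList.takeWhile PySem.Chars.isspace
      ++ "# Performance: Consider list[t.Any] comprehension for 20-30% improvement".toList := by
  simp [pvComment_eq]

theorem pvComment_idem (l : String) : pvComment (pvComment l) = pvComment l := by
  have htw : ((pvComment l).toList).takeWhile PySem.Chars.isspace = l.toList.takeWhile PySem.Chars.isspace := by
    rw [pvComment_toList, List.takeWhile_append]
    simp [List.takeWhile_idem]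
    decide
  rw [pvComment_eq (pvComment l), htw, pvComment_eq]

def pvStepK (st : List String × Bool) (k : Int) : List String × Bool :=
  if k - 1 < (st.1.length : Int) then
    (PySem.List.insert st.1 (k - 1) (pvComment ((PySem.List.pyGet? st.1 (k - 1)).getD "")), true)
  else st

def pvExpand (ks : List Int) : List String → Int → List String
  | [], _ => []
  | l :: rest, s => List.replicate (ks.count (s + 1)) (pvComment l) ++ l :: pvExpand ks rest (s + 1)

theorem pvExpand_no_keys (ks : List Int) (ls : List String) (s : Int)
    (h : ∀ k ∈ ks, k ≤ s) : pvExpand ks ls s = ls := by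
  induction ls generalizing s with
  | nil => rfl
  | cons l rest ih =>
    have hc : ks.count (s + 1) = 0 := by
      rw [List.count_eq_zero]
      intro hm
      have := h _ hm; omega
    simp [pvExpand, hc, ih (s+1) (fun k hk => by have := h k hk; omega)]

theorem pvExpand_drop (k : Int) (ks : List Int) (ls : List String) (s : Int)
    (h : k ≤ s ∨ (s + ls.length : Int) < k) : pvExpand (k :: ks) ls s = pvExpand ks ls s := by
  induction ls generalizing s with
  | nil => rfl
  | cons l rest ih =>
    have hk : k ≠ s + 1 := by rcases h with h | h <;> simp at h ⊢ <;> omega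
    have hc : (k :: ks).count (s + 1) = ks.count (s + 1) := by
      rw [List.count_cons]; simp [hk]
    have hrest : pvExpand (k :: ks) rest (s+1) = pvExpand ks rest (s+1) := by
      apply ih
      rcases h with h | h
      · left; omega
      · right; simp at h ⊢; omega
    simp [pvExpand, hc, hrest]

theorem pvExpand_insert (p : Nat) (cur : List String) (s : Int) (ks : List Int)
    (hp : p < cur.length) (hk : ∀ k' ∈ ks, k' ≤ s + p + 1) :
    pvExpand ks (cur.take p ++ pvComment cur[p] :: cur.drop p) s
      = pvExpand ((s + p + 1) :: ks) cur s := by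
  induction p generalizing cur s with
  | zero =>
    cases cur with
    | nil => simp at hp
    | cons l rest =>
      simp only [List.take_zero, List.drop_zero, List.nil_append, List.getElem_cons_zero,
        Nat.cast_zero, add_zero]
      have hb : ∀ k ∈ ks, k ≤ s + 1 := fun k hm => by
        have := hk k hm; push_cast at this; omega
      have hc2 : ks.count (s + 1 + 1) = 0 := by
        rw [List.count_eq_zero]; intro hm; have := hb _ hm; omega
      have hrest' : pvExpand ks rest (s + 1 + 1) = rest :=
        pvExpand_no_keys _ _ _ (fun k hm => by have := hb k hm; omega)
      have hrest2 : pvExpand ((s + 1) :: ks) rest (s + 1) = rest := by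
        rw [pvExpand_drop _ _ _ _ (Or.inl (by omega))]
        exact pvExpand_no_keys _ _ _ (fun k hm => by have := hb k hm; omega)
      have hcnt : ((s + 1) :: ks).count (s + 1) = ks.count (s + 1) + 1 := by
        rw [List.count_cons]; simp
      simp [pvExpand, hc2, hrest', hrest2, hcnt, pvComment_idem, List.replicate_succ']
  | succ p ih =>
    cases cur with
    | nil => simp at hp
    | cons l rest =>
      have hp' : p < rest.length := by simpa using hp
      simp only [List.take_succ_cons, List.drop_succ_cons, List.cons_append, List.getElem_cons_succ]
      have hinner : pvExpand ks (rest.take p ++ pvComment rest[p] :: rest.drop p) (s + 1)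
          = pvExpand ((s + 1 + p + 1) :: ks) rest (s + 1) :=
        ih rest (s + 1) hp' (fun k hm => by have := hk k hm; push_cast at this ⊢; omega)
      have hkey : s + 1 + (p : Int) + 1 = s + (((p : Nat) + 1 : Nat) : Int) + 1 := by push_cast; ring
      have hcnt : List.count (s + 1) ((s + (((p : Nat) + 1 : Nat) : Int) + 1) :: ks)
          = List.count (s + 1) ks := by
        rw [List.count_cons]; simp; omega
      simp only [pvExpand, hinner, hkey, hcnt]

theorem pvMainA (ks : List Int) (cur : List String) (m : Bool)
    (hdesc : ks.Pairwise (fun a b => b ≤ a)) (hpos : ∀ k ∈ ks, 1 ≤ k) :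
    ks.foldl pvStepK (cur, m)
      = (pvExpand ks cur 0, m || ks.any (fun k => decide (k - 1 < (cur.length : Int)))) := by
  induction ks generalizing cur m with
  | nil =>
    simp [List.foldl_nil, pvExpand_no_keys ([] : List Int) cur 0 (by simp)]
  | cons k ks ih =>
    rw [List.pairwise_cons] at hdesc
    obtain ⟨hhead, hdesc'⟩ := hdesc
    have h1 : 1 ≤ k := hpos k (by simp)
    have hpos' : ∀ k' ∈ ks, 1 ≤ k' := fun k' hm => hpos k' (by simp [hm])
    rw [List.foldl_cons]
    by_cases hlt : k - 1 < (cur.length : Int)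
    · set p : Nat := (k - 1).toNat with hpdef
      have hpi : ((p : Nat) : Int) = k - 1 := Int.toNat_of_nonneg (by omega)
      have hp : p < cur.length := by omega
      have hstep : pvStepK (cur, m) k = (cur.take p ++ pvComment cur[p] :: cur.drop p, true) := by
        unfold pvStepK
        simp only [hlt, if_pos]
        rw [show (k - 1) = ((p : Nat) : Int) from hpi.symm]
        rw [PySem.List.insert_natCast cur p _ (by omega)]
        rw [PySem.List.pyGet?_natCast]
        simp [List.getElem?_eq_getElem hp]
      rw [hstep, ih _ true hdesc' hpos']
      have hexp : pvExpand ks (cur.take p ++ pvComment cur[p] :: cur.drop p) 0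
          = pvExpand (k :: ks) cur 0 := by
        have := pvExpand_insert p cur 0 ks hp (fun k' hm => by
          have := hhead k' hm; omega)
        rw [this, show ((0 : Int) + p + 1) = k by omega]
      rw [hexp]
      simp only [List.any_cons, hlt, decide_true, Bool.true_or, Bool.or_true]
    · have hstep : pvStepK (cur, m) k = (cur, m) := by
        unfold pvStepK; simp [hlt]
      rw [hstep, ih _ m hdesc' hpos']
      have hexp : pvExpand (k :: ks) cur 0 = pvExpand ks cur 0 :=
        pvExpand_drop _ _ _ _ (Or.inr (by omega))
      rw [hexp]
      have hnk : ¬ (k ≤ (cur.length : Int)) := by omega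
      simp [List.any_cons, hnk]

def pvExpandF (f : Int → Int) : List String → Int → List String
  | [], _ => []
  | l :: rest, s => List.replicate (f s).toNat (pvComment l) ++ l :: pvExpandF f rest (s + 1)

theorem pvExpB (f : Int → Int) (ls : List String) (s : Int) (acc : List String) :
    (PySem.List.enumerate ls s).foldl
        (fun acc p =>
          let c := f p.1
          if c ≠ 0 then acc ++ (List.replicate c.toNat (pvComment p.2) ++ [p.2])
          else acc ++ [p.2]) acc
      = acc ++ pvExpandF f ls s := by
  induction ls generalizing s acc with
  | nil => simp [PySem.List.enumerate_nil, pvExpandF]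
  | cons l rest ih =>
    rw [PySem.List.enumerate_cons, List.foldl_cons, ih]
    by_cases h : f s ≠ 0
    · simp [pvExpandF, h]
    · simp only [ne_eq, not_not] at h
      simp [pvExpandF, h]

theorem pvExpand_id (ks : List Int) (ls : List String) (s : Int)
    (h : ∀ j : Int, s ≤ j → j < s + ls.length → ks.count (j + 1) = 0) :
    pvExpand ks ls s = ls := by
  induction ls generalizing s with
  | nil => rfl
  | cons l rest ih =>
    have h0 : ks.count (s + 1) = 0 := h s le_rfl (by simp)
    have ht : pvExpand ks rest (s + 1) = rest :=
      ih (s + 1) (fun j hj1 hj2 => h j (by omega) (by simp at hj2 ⊢; omega))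
    simp [pvExpand, h0, ht]

theorem pvExpandF_eq (f : Int → Int) (ks : List Int) (ls : List String) (s : Int)
    (h : ∀ j : Int, s ≤ j → j < s + ls.length → (f j).toNat = ks.count (j + 1)) :
    pvExpandF f ls s = pvExpand ks ls s := by
  induction ls generalizing s with
  | nil => rfl
  | cons l rest ih =>
    have h0 : (f s).toNat = ks.count (s + 1) := h s le_rfl (by simp)
    have ht : pvExpandF f rest (s + 1) = pvExpand ks rest (s + 1) :=
      ih (s + 1) (fun j hj1 hj2 => h j (by omega) (by simp at hj2 ⊢; omega))
    simp [pvExpandF, pvExpand, h0, ht]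

theorem pvSetOfList_eq_nil_iff (xs : List Int) : PySem.Set.ofList xs = [] ↔ xs = [] := by
  cases xs with
  | nil => simp
  | cons x t =>
    constructor
    · intro h; rw [PySem.Set.ofList_cons] at h; cases h
    · intro h; cases h

-- ===== VERDICT =====
theorem apply_list_comprehension_optimizations_py_spec : Claim_equal_apply_list_comprehension_optimizations_py := by
  intro lines issue _ hpre
  unfold Spec_apply_list_comprehension_optimizations_py
  unfold Pre_apply_list_comprehension_optimizations_py at hpre
  -- names for the pieces
  set I := (PySem.Dict.ofList issue).getD "instances" [] with hIdef
  set S := PySem.List.sorted I pvLineNo true with hSdef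
  set ks := S.map pvLineNo with hksdef
  set T := I.map (fun inst => pvLineNo inst - 1) with hTdef
  set pb := (fun idx : Int => decide (0 ≤ idx ∧ idx < (lines.length : Int))) with hpbdef
  set V := T.filter pb with hVdef
  set C := V.foldl (fun d idx => d.insert idx (d.getD idx 0 + 1))
      (PySem.Dict.empty : PySem.Dict Int Int) with hCdef
  -- A's fold is the key-level fold over the sorted line numbers
  have e1 : apply_list_comprehension_optimizations_py lines issue
      = ks.foldl pvStepK (lines, false) := by
    rw [hksdef, List.foldl_map]
    rfl
  -- B is the counter of valid targets, then (if nonempty) the forward pass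
  have e2 : apply_list_comprehension_optimizations_py_alt lines issue
      = (if C.items.isEmpty then (lines, false)
         else ((PySem.List.enumerate lines 0).foldl
            (fun acc p =>
              let c := C.getD p.1 0
              if c ≠ 0 then acc ++ (List.replicate c.toNat (pvComment p.2) ++ [p.2])
              else acc ++ [p.2]) [],
           true)) := by
    rw [hCdef, hVdef, hpbdef, List.foldl_filter]
    simp only [decide_eq_true_eq]
    rfl
  -- sortedness  -- sortedness / positivity of the key list
  have hdesc : ks.Pairwise (fun a b => b ≤ a) :=
    List.pairwise_map.mpr (PySem.List.sorted_pairwise_rev I pvLineNo)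
  have hpos : ∀ k ∈ ks, 1 ≤ k := by
    intro k hk
    rw [hksdef, List.mem_map] at hk
    obtain ⟨inst, hm, rfl⟩ := hk
    exact hpre inst ((PySem.List.mem_sorted _ _ _ _).mp hm)
  -- the counter lookups
  have hgetD : ∀ j : Int, C.getD j 0 = (V.count j : Int) := by
    intro j
    rw [hCdef, PySem.Dict.getD_foldl_insert_add_one]
    simp
  have hcount : ∀ j : Int, 0 ≤ j → j < (lines.length : Int) → V.count j = ks.count (j + 1) := by
    intro j h0 hL
    have h1 : V.count j = T.count j :=
      List.count_filter (by rw [hpbdef]; exact decide_eq_true ⟨h0, hL⟩)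
    rw [h1, hTdef, hksdef, List.count_eq_countP, List.count_eq_countP,
      List.countP_map, List.countP_map,
      (PySem.List.sorted_perm I pvLineNo true).countP_eq]
    apply List.countP_congr
    intro x _
    by_cases h : pvLineNo x = j + 1
    · simp [h]
    · have h' : pvLineNo x - 1 ≠ j := by omega
      simp [h, h']
  -- the two modified flags agree
  have hiff : (∃ x ∈ T, pb x = true) ↔ (∃ k ∈ ks, k - 1 < (lines.length : Int)) := by
    constructor
    · rintro ⟨t, ht, hp⟩
      rw [hTdef, List.mem_map] at ht
      obtain ⟨inst, hmI, rfl⟩ := ht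
      refine ⟨pvLineNo inst, ?_, ?_⟩
      · rw [hksdef, List.mem_map]
        exact ⟨inst, (PySem.List.mem_sorted _ _ _ _).mpr hmI, rfl⟩
      · rw [hpbdef] at hp
        exact (of_decide_eq_true hp).2
    · rintro ⟨k, hk, hlt⟩
      rw [hksdef, List.mem_map] at hk
      obtain ⟨inst, hmS, rfl⟩ := hk
      have hmI := (PySem.List.mem_sorted _ _ _ _).mp hmS
      refine ⟨pvLineNo inst - 1, ?_, ?_⟩
      · rw [hTdef, List.mem_map]
        exact ⟨inst, hmI, rfl⟩
      · rw [hpbdef]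
        exact decide_eq_true ⟨by have := hpre inst hmI; omega, hlt⟩
  have hkeys : C.keys = PySem.Set.ofList V := by
    rw [hCdef, PySem.Dict.keys_foldl_insert, PySem.Dict.keys_empty, PySem.Set.update_nil_left]
  have hitems : C.items = [] ↔ V = [] := by
    constructor
    · intro h
      have hk0 : C.keys = [] := by simp [PySem.Dict.keys, h]
      rw [hkeys] at hk0
      exact (pvSetOfList_eq_nil_iff V).mp hk0
    · intro h
      rw [hCdef, h]
      rfl
  have hmod : (!C.items.isEmpty) = ks.any (fun k => decide (k - 1 < (lines.length : Int))) := by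
    apply Bool.coe_iff_coe.mp
    rw [Bool.not_eq_true', Bool.eq_false_iff, Ne, List.isEmpty_iff, List.any_eq_true, hitems]
    constructor
    · intro h
      obtain ⟨x, hx⟩ := List.exists_mem_of_ne_nil V h
      have hxm := List.mem_filter.mp hx
      obtain ⟨k, hk, hlt⟩ := hiff.mp ⟨x, hxm.1, hxm.2⟩
      exact ⟨k, hk, decide_eq_true hlt⟩
    · rintro ⟨k, hk, hd⟩ hV
      obtain ⟨t, htT, hpt⟩ := hiff.mpr ⟨k, hk, of_decide_eq_true hd⟩
      exact List.ne_nil_of_mem (List.mem_filter.mpr ⟨htT, hpt⟩) hV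
  -- assemble
  rw [e1, e2, pvMainA ks lines false hdesc hpos]
  by_cases hemp : C.items.isEmpty = true
  · have hV : V = [] := hitems.mp (List.isEmpty_iff.mp hemp)
    have hzero : ∀ j : Int, 0 ≤ j → j < (0 : Int) + lines.length → ks.count (j + 1) = 0 := by
      intro j hj1 hj2
      rw [← hcount j hj1 (by simpa using hj2), hV]
      rfl
    have hany : ks.any (fun k => decide (k - 1 < (lines.length : Int))) = false := by
      rw [← hmod, hemp]
      rfl
    rw [hemp, if_pos rfl, pvExpand_id ks lines 0 hzero]
    refine Prod.ext rfl ?_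
    simp only [Bool.false_or]
    exact hany
  · have hemp' : C.items.isEmpty = false := by
      cases h : C.items.isEmpty
      · rfl
      · exact absurd h hemp
    have hany : ks.any (fun k => decide (k - 1 < (lines.length : Int))) = true := by
      rw [← hmod, hemp']
      rfl
    rw [hemp', if_neg (by simp), pvExpB (fun i => C.getD i 0) lines 0 []]
    simp only [List.nil_append, Bool.false_or, hany]
    refine Prod.ext ?_ rfl
    exact ((pvExpandF_eq (fun i => C.getD i 0) ks lines 0 (fun j hj1 hj2 => by
      simp only [hgetD, hcount j hj1 (by simpa using hj2)]
      simp)).symm)
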